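-- pv_equiv track=rewrite | github.com/Albert-W/leetcode | round2/3142.check-if-grid-satisfies-conditions.py | satisfiesConditions
-- ===== SOURCE A (Python) =====
-- def satisfiesConditions(grid):
--     """
--     :type grid: List[List[int]]
--     :rtype: bool
--     """
--     for i in range(len(grid)):
--         for j in range(len(grid[0])):
--             if i + 1 < len(grid) and grid[i][j] != grid[i + 1][j]:
--                 return False
--             if j + 1 < len(grid[0]) and grid[i][j] == grid[i][j + 1]:
--                 return False
--     return True
-- ===== SOURCE B (Python) =====
-- def satisfiesConditions(grid):
--     """
--     :type grid: List[List[int]]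
--     :rtype: bool
--     """
--     if not grid:
--         return True
--     first = grid[0]
--     w = len(first)
--     return (all(row[:w] == first for row in grid)
--             and all(first[j] != first[j + 1] for j in range(w - 1)))
-- ===== Notes on version B (the rewrite author's own statement) =====
-- stated objective: simpler
-- what changed: Replaces the per-cell nested up/down and left/right neighbour checks with whole-row equality against the first row plus a single adjacency scan over the first row only.
-- outside the precondition, e.g. on satisfiesConditions([[1, 1], [1]]): A returns False, B returns False
import Mathlib
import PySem

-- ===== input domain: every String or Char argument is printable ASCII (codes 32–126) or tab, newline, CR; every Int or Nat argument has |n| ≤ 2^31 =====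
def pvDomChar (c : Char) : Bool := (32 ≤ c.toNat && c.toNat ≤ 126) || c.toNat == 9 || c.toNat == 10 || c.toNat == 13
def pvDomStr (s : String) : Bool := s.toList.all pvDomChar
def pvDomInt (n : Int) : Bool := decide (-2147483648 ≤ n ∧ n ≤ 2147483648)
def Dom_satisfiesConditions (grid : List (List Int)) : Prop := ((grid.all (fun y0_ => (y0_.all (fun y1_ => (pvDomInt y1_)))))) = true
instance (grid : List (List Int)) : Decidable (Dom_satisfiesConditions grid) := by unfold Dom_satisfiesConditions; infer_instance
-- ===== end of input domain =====

-- B replaces A's per-cell up/down and left/right neighbour checks by whole-row comparison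
-- against the first row plus one adjacency scan over the first row only (objective: simpler).

-- ===== PORT A =====
-- Nested for-loops with early `return False`, as structural recursion on the loop counters.
-- `grid[i][j]` is ported as `getD _ 0`: on inputs satisfying Pre_ every index A evaluates is
-- a nonnegative in-range index, where Python indexing agrees with getD (A raises out of range;
-- Pre_ excludes those inputs).
def satA_loop (grid : List (List Int)) (n w i j : Nat) : Bool :=
  if i < n then
    if j < w then
      if i + 1 < n ∧ (grid.getD i []).getD j 0 ≠ (grid.getD (i+1) []).getD j 0 then false
      else if j + 1 < w ∧ (grid.getD i []).getD j 0 = (grid.getD i []).getD (j+1) 0 then false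
      else satA_loop grid n w i (j+1)
    else satA_loop grid n w (i+1) 0
  else true
termination_by (n - i, w - j)
decreasing_by all_goals (simp_wf; omega)

def satisfiesConditions (grid : List (List Int)) : Bool :=
  -- len(grid[0]) is only reached when grid ≠ []; headD is its value then
  satA_loop grid grid.length (grid.headD []).length 0 0

-- ===== PORT B =====
def satisfiesConditions_alt (grid : List (List Int)) : Bool :=
  match grid with
  | [] => true
  | first :: rest =>
    let w := first.length
    ((first :: rest).all (fun row => PySem.List.slice row none (some (w : Int)) == first)) &&
    ((List.range (w - 1)).all (fun j => first.getD j 0 != first.getD (j+1) 0))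

-- ===== PRECONDITION & SPEC =====
-- Pre_ excludes grids in which some row is shorter than the first row: there A's indexed
-- column scan raises IndexError (or, if an earlier cell already fails a check, returns False
-- through an accident of scan order); B compares whole rows and is well defined everywhere.
def Pre_satisfiesConditions (grid : List (List Int)) : Prop :=
  ∀ row ∈ grid, (grid.headD []).length ≤ row.length
instance (grid : List (List Int)) : Decidable (Pre_satisfiesConditions grid) := by
  unfold Pre_satisfiesConditions; infer_instance

def pvWitness_satisfiesConditions : List (List Int) := [[1, 2], [1, 2]]

def Spec_satisfiesConditions (grid : List (List Int)) (out : Bool) : Prop := out = satisfiesConditions_alt grid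
instance (grid : List (List Int)) (out : Bool) : Decidable (Spec_satisfiesConditions grid out) := by unfold Spec_satisfiesConditions; infer_instance

-- ===== CLAIM (what is proved, stated in full; the proofs are below) =====
def Claim_equal_satisfiesConditions : Prop := ∀ (grid : List (List Int)), Dom_satisfiesConditions grid → Pre_satisfiesConditions grid → Spec_satisfiesConditions grid (satisfiesConditions grid)

-- ===== LEMMAS AND PROOFS =====

-- the per-cell condition A checks at cell (i, j)
def cellOK (grid : List (List Int)) (n w i j : Nat) : Prop :=
  (i + 1 < n → (grid.getD i []).getD j 0 = (grid.getD (i+1) []).getD j 0) ∧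
  (j + 1 < w → (grid.getD i []).getD j 0 ≠ (grid.getD i []).getD (j+1) 0)

-- characterisation of A's double loop with early exit
lemma satA_loop_true_iff (grid : List (List Int)) (n w : Nat) :
    ∀ i j, satA_loop grid n w i j = true ↔
      ∀ i' j', i' < n → j' < w → (i < i' ∨ (i = i' ∧ j ≤ j')) → cellOK grid n w i' j' := by
  intro i j
  fun_induction satA_loop grid n w i j with
  | case1 i j hi hj hc =>
    simp only [Bool.false_eq_true, false_iff]
    intro h
    exact hc.2 ((h i j hi hj (by omega)).1 hc.1)
  | case2 i j hi hj hc1 hc2 =>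
    simp only [Bool.false_eq_true, false_iff]
    intro h
    exact (h i j hi hj (by omega)).2 hc2.1 hc2.2
  | case3 i j hi hj hc1 hc2 ih =>
    rw [ih]
    constructor
    · intro h i' j' hi' hj' hlex
      by_cases hij : i' = i ∧ j' = j
      · obtain ⟨rfl, rfl⟩ := hij
        refine ⟨fun h1 => ?_, fun h2 heq => hc2 ⟨h2, heq⟩⟩
        by_contra hne
        exact hc1 ⟨h1, hne⟩
      · exact h i' j' hi' hj' (by omega)
    · intro h i' j' hi' hj' hlex
      exact h i' j' hi' hj' (by omega)
  | case4 i j hi hj ih =>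
    rw [ih]
    constructor
    · intro h i' j' hi' hj' hlex
      exact h i' j' hi' hj' (by omega)
    · intro h i' j' hi' hj' hlex
      exact h i' j' hi' hj' (by omega)
  | case5 i j hi =>
    constructor
    · intro _ i' j' hi' hj' hlex
      exact absurd (by omega) hi
    · intro _
      rfl

lemma satA_true_iff (grid : List (List Int)) :
    satisfiesConditions grid = true ↔
      ∀ i j, i < grid.length → j < (grid.headD []).length →
        cellOK grid grid.length (grid.headD []).length i j := by
  rw [satisfiesConditions, satA_loop_true_iff]
  constructor
  · intro h i j hi hj
    exact h i j hi hj (by omega)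
  · intro h i' j' hi' hj' _
    exact h i' j' hi' hj'

lemma satB_true_iff (first : List Int) (rest : List (List Int)) :
    satisfiesConditions_alt (first :: rest) = true ↔
      ((∀ row ∈ (first :: rest), row.take first.length = first) ∧
       (∀ j, j + 1 < first.length → first.getD j 0 ≠ first.getD (j+1) 0)) := by
  simp only [satisfiesConditions_alt, Bool.and_eq_true, List.all_eq_true, List.mem_range,
    PySem.List.slice_to_natCast, beq_iff_eq, bne_iff_ne, ne_eq]
  constructor
  · rintro ⟨h1, h2⟩
    exact ⟨h1, fun j hj => h2 j (by omega)⟩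
  · rintro ⟨h1, h2⟩
    exact ⟨h1, fun j hj => h2 j (by omega)⟩

-- the core bridge: on rectangular-enough grids the per-cell conditions are the row conditions
lemma cells_iff_rows (first : List Int) (rest : List (List Int))
    (hpre : ∀ row ∈ (first :: rest), first.length ≤ row.length) :
    (∀ i j, i < (first :: rest).length → j < first.length →
        cellOK (first :: rest) (first :: rest).length first.length i j) ↔
      ((∀ row ∈ (first :: rest), row.take first.length = first) ∧
       (∀ j, j + 1 < first.length → first.getD j 0 ≠ first.getD (j+1) 0)) := by
  constructor
  · intro h
    have vert : ∀ i, i < (first :: rest).length → ∀ j, j < first.length →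
        ((first :: rest).getD i []).getD j 0 = first.getD j 0 := by
      intro i
      induction i with
      | zero => intro _ j hj; rfl
      | succ k ih =>
        intro hk j hj
        have hstep := (h k j (by omega) hj).1 (by omega)
        rw [← hstep]
        exact ih (by omega) j hj
    refine ⟨?_, ?_⟩
    · intro row hrow
      obtain ⟨i, hi, rfl⟩ := List.mem_iff_getElem.mp hrow
      have hlen : first.length ≤ ((first :: rest)[i]).length :=
        hpre _ (List.getElem_mem hi)
      apply List.ext_getElem
      · simp [List.length_take]; omega
      · intro j hj1 hj2
        simp only [List.length_take] at hj1
        have hjw : j < first.length := by omega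
        have hjr : j < ((first :: rest)[i]).length := by omega
        have hv := vert i hi j hjw
        have e1 : (first :: rest).getD i [] = (first :: rest)[i] :=
          List.getD_eq_getElem _ _ hi
        rw [e1, List.getD_eq_getElem _ _ hjr, List.getD_eq_getElem _ _ hjw] at hv
        simpa [List.getElem_take] using hv
    · intro j hj
      have := (h 0 j (by simp) (by omega)).2 hj
      simpa using this
  · rintro ⟨hrows, hadj⟩
    have gval : ∀ i, i < (first :: rest).length → ∀ j, j < first.length →
        ((first :: rest).getD i []).getD j 0 = first.getD j 0 := by
      intro i hi j hj
      have hrow := hrows ((first :: rest)[i]) (List.getElem_mem hi)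
      have hlen : first.length ≤ ((first :: rest)[i]).length :=
        hpre _ (List.getElem_mem hi)
      have hjr : j < ((first :: rest)[i]).length := by omega
      have hth : (((first :: rest)[i]).take first.length).getD j 0 = first.getD j 0 := by
        rw [hrow]
      have htl : j < (((first :: rest)[i]).take first.length).length := by
        simp [List.length_take]; omega
      rw [List.getD_eq_getElem _ _ htl, List.getD_eq_getElem _ _ hj] at hth
      have e1 : (first :: rest).getD i [] = (first :: rest)[i] :=
        List.getD_eq_getElem _ _ hi
      rw [e1, List.getD_eq_getElem _ _ hjr, List.getD_eq_getElem _ _ hj]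
      simpa [List.getElem_take] using hth
    intro i j hi hj
    refine ⟨fun h1 => ?_, fun h2 heq => ?_⟩
    · rw [gval i hi j hj, gval (i+1) h1 j hj]
    · rw [gval i hi j hj, gval i hi (j+1) h2] at heq
      exact hadj j h2 heq

-- ===== VERDICT (by name: the statement is the Claim_ definition above) =====
theorem satisfiesConditions_spec : Claim_equal_satisfiesConditions := by
  intro grid _ hpre
  unfold Spec_satisfiesConditions
  rw [Bool.eq_iff_iff]
  match grid with
  | [] => simp [satisfiesConditions, satisfiesConditions_alt, satA_loop]
  | first :: rest =>
    rw [satA_true_iff, satB_true_iff]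
    simp only [List.headD_cons]
    exact cells_iff_rows first rest (by simpa [Pre_satisfiesConditions] using hpre)
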